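-- pv_equiv track=rewrite | github.com/joshanashakya/dissertation | workspace/dataset/java-python/GeeksForGeeks/4158/A/2.py | lastNonRepeating
-- ===== SOURCE A (Python) =====
-- MAX = 256;
--
-- def lastNonRepeating(string, n) :
--
--     # To store the frequency of each of
--     # the character of the given string
--     freq = [0]*MAX;
--
--     # Update the frequencies
--     for i in range(n) :
--         freq[ord(string[i])] += 1;
--
--     # Starting from the last character
--     for i in range(n-1,-1,-1) :
--
--         # Current character
--         ch = string[i];
--
--         # If frequency of the current character is 1
--         # then return the character
--         if (freq[ord(ch)] == 1) :
--             return ("" + ch);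
--
--
--     # All the characters of the
--     # string are repeating
--     return "-1";
-- ===== SOURCE B (Python) =====
-- MAX = 256
--
-- def lastNonRepeating(string, n):
--     # One forward pass builds both the frequency table and the last-seen
--     # position of each code point; then reduce over the 256-slot table.
--     freq = [0] * MAX
--     pos = [-1] * MAX
--     for i in range(n):
--         c = ord(string[i])
--         freq[c] += 1
--         pos[c] = i
--     best = (-1, 0)  # (position, code point)
--     for c in range(MAX):
--         if freq[c] == 1 and pos[c] > best[0]:
--             best = (pos[c], c)
--     return chr(best[1]) if best[0] >= 0 else "-1"
-- ===== Notes on version B (the rewrite author's own statement) =====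
-- stated objective: alternative
-- what changed: A's second pass scans the string backwards returning the first character whose count is 1; B records last-seen positions alongside the counts in the single forward pass and then reduces over the 256-slot table, picking the unique-count code point with the largest position.
import Mathlib
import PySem

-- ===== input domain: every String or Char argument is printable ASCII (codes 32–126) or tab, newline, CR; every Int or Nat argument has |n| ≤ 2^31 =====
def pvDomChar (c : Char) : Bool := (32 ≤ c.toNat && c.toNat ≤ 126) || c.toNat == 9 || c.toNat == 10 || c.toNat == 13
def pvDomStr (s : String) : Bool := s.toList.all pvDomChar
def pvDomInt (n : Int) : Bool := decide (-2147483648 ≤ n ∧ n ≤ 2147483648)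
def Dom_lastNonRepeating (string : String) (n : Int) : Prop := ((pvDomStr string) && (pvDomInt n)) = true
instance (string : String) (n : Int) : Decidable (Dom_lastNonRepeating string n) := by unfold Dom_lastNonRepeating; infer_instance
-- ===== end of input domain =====

-- B replaces A's reverse scan of the string by a reduction over the 256-slot table
-- (one forward pass records counts and last positions); equivalence of return values only.

-- ===== PORT A =====
def lastNonRepeating (string : String) (n : Int) : String :=
  let cs := string.toList
  let freq : List Int :=
    (PySem.List.pyRange 0 n 1).foldl
      (fun freq i =>
        freq.set (PySem.List.pyGetD cs i ' ').toNat
          (freq.getD (PySem.List.pyGetD cs i ' ').toNat 0 + 1))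
      (List.replicate 256 0)
  match (PySem.List.pyRange (n - 1) (-1) (-1)).findSome?
      (fun i =>
        if freq.getD (PySem.List.pyGetD cs i ' ').toNat 0 = 1 then
          some (String.ofList [PySem.List.pyGetD cs i ' '])
        else none) with
  | some s => s
  | none => "-1"

-- ===== PORT B =====
def lastNonRepeating_alt (string : String) (n : Int) : String :=
  let cs := string.toList
  let fp : List Int × List Int :=
    (PySem.List.pyRange 0 n 1).foldl
      (fun fp i =>
        (fp.1.set (PySem.List.pyGetD cs i ' ').toNat
            (fp.1.getD (PySem.List.pyGetD cs i ' ').toNat 0 + 1),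
         fp.2.set (PySem.List.pyGetD cs i ' ').toNat i))
      (List.replicate 256 0, List.replicate 256 (-1))
  let best : Int × Int :=
    (List.range 256).foldl
      (fun b c =>
        if fp.1.getD c 0 = 1 ∧ fp.2.getD c 0 > b.1 then (fp.2.getD c 0, (c : Int)) else b)
      (-1, 0)
  if best.1 ≥ 0 then String.ofList [Char.ofNat best.2.toNat] else "-1"

-- ===== PRECONDITION & SPEC =====
-- Pre_ excludes exactly the inputs where A raises IndexError: n larger than the string length.
def Pre_lastNonRepeating (string : String) (n : Int) : Prop := n ≤ PySem.Str.len string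
instance (string : String) (n : Int) : Decidable (Pre_lastNonRepeating string n) := by
  unfold Pre_lastNonRepeating; infer_instance

def pvWitness_lastNonRepeating : String × Int := ("aabc", 4)

def Spec_lastNonRepeating (string : String) (n : Int) (out : String) : Prop := out = lastNonRepeating_alt string n
instance (string : String) (n : Int) (out : String) : Decidable (Spec_lastNonRepeating string n out) := by unfold Spec_lastNonRepeating; infer_instance

-- ===== CLAIM (what is proved, stated in full; the proofs are below) =====
def Claim_equal_lastNonRepeating : Prop := ∀ (string : String) (n : Int), Dom_lastNonRepeating string n → Pre_lastNonRepeating string n → Spec_lastNonRepeating string n (lastNonRepeating string n)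

-- ===== LEMMAS AND PROOFS =====

-- code point of character i (Python's ord(string[i]) for in-range i)
def pvCode (cs : List Char) (i : Nat) : Nat := (cs.getD i ' ').toNat

-- number of occurrences of code c among the first m characters
def pvCnt (f : Nat → Nat) (c : Nat) : Nat → Nat
  | 0 => 0
  | m + 1 => pvCnt f c m + (if f m = c then 1 else 0)

-- last position of code c among the first m characters (-1 if absent)
def pvLastP (f : Nat → Nat) (c : Nat) : Nat → Int
  | 0 => -1
  | m + 1 => if f m = c then (m : Int) else pvLastP f c m

-- downward first-hit scan (A's reverse loop with early return)
def pvDownFind {β : Type} (g : Nat → Option β) : Nat → Option β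
  | 0 => none
  | m + 1 => match g m with
    | some v => some v
    | none => pvDownFind g m

def pvFreq (f : Nat → Nat) (m : Nat) : List Int :=
  (List.range m).foldl (fun freq k => freq.set (f k) (freq.getD (f k) 0 + 1))
    (List.replicate 256 0)

def pvPos (f : Nat → Nat) (m : Nat) : List Int :=
  (List.range m).foldl (fun pos k => pos.set (f k) (k : Int)) (List.replicate 256 (-1))

def pvBFold (freq pos : List Int) (C : Nat) : Int × Int :=
  (List.range C).foldl
    (fun b c => if freq.getD c 0 = 1 ∧ pos.getD c 0 > b.1 then (pos.getD c 0, (c : Int)) else b)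
    (-1, 0)

lemma pvGetD_replicate (k : Nat) (c : Nat) (a d : Int) : (List.replicate k a).getD c d = if c < k then a else d := by
  simp [List.getD_eq_getElem?_getD, List.getElem?_replicate]
  split <;> rfl

lemma pvGetD_set_self (l : List Int) (i : Nat) (v d : Int) (h : i < l.length) :
    (l.set i v).getD i d = v := by
  simp [List.getD_eq_getElem?_getD, h]

lemma pvGetD_set_ne (l : List Int) (i j : Nat) (v d : Int) (h : i ≠ j) :
    (l.set i v).getD j d = l.getD j d := by
  simp [List.getD_eq_getElem?_getD, h]

lemma pvFreq_zero (f : Nat → Nat) : pvFreq f 0 = List.replicate 256 0 := rfl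

lemma pvPos_zero (f : Nat → Nat) : pvPos f 0 = List.replicate 256 (-1) := rfl

lemma pvFreq_succ (f : Nat → Nat) (m : Nat) :
    pvFreq f (m + 1) = (pvFreq f m).set (f m) ((pvFreq f m).getD (f m) 0 + 1) := by
  unfold pvFreq
  rw [List.range_succ, List.foldl_append]
  rfl

lemma pvPos_succ (f : Nat → Nat) (m : Nat) :
    pvPos f (m + 1) = (pvPos f m).set (f m) (m : Int) := by
  unfold pvPos
  rw [List.range_succ, List.foldl_append]
  rfl

lemma pvFreq_length (f : Nat → Nat) : ∀ m, (pvFreq f m).length = 256 := by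
  intro m
  induction m with
  | zero => rw [pvFreq_zero]; exact List.length_replicate
  | succ m ih => rw [pvFreq_succ, List.length_set]; exact ih

lemma pvPos_length (f : Nat → Nat) : ∀ m, (pvPos f m).length = 256 := by
  intro m
  induction m with
  | zero => rw [pvPos_zero]; exact List.length_replicate
  | succ m ih => rw [pvPos_succ, List.length_set]; exact ih

lemma pvFreq_getD (f : Nat → Nat) (hf : ∀ i, f i < 256) :
    ∀ m c, (pvFreq f m).getD c 0 = (pvCnt f c m : Int) := by
  intro m
  induction m with
  | zero => intro c; rw [pvFreq_zero, pvGetD_replicate, pvCnt]; simp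
  | succ m ih =>
    intro c
    rw [pvFreq_succ]
    by_cases h : f m = c
    · subst h
      rw [pvGetD_set_self _ _ _ _ (by rw [pvFreq_length]; exact hf m), ih]
      simp [pvCnt]
    · rw [pvGetD_set_ne _ _ _ _ _ h, ih]
      simp [pvCnt, h]

lemma pvPos_getD (f : Nat → Nat) (hf : ∀ i, f i < 256) :
    ∀ m c, c < 256 → (pvPos f m).getD c 0 = pvLastP f c m := by
  intro m
  induction m with
  | zero => intro c hc; rw [pvPos_zero, pvGetD_replicate, if_pos hc]; rfl
  | succ m ih =>
    intro c hc
    rw [pvPos_succ]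
    by_cases h : f m = c
    · subst h
      rw [pvGetD_set_self _ _ _ _ (by rw [pvPos_length]; exact hf m)]
      simp [pvLastP]
    · rw [pvGetD_set_ne _ _ _ _ _ h, ih c hc]
      simp [pvLastP, h]

lemma pvCnt_zero (f : Nat → Nat) (c : Nat) :
    ∀ m, pvCnt f c m = 0 → ∀ i < m, f i ≠ c := by
  intro m
  induction m with
  | zero => intro _ i hi; omega
  | succ m ih =>
    intro h i hi
    rw [pvCnt] at h
    by_cases hm : f m = c
    · simp [hm] at h
    · rcases Nat.lt_succ_iff_lt_or_eq.mp hi with hi' | rfl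
      · exact ih (by omega) i hi'
      · exact hm

lemma pvCnt_one (f : Nat → Nat) (c : Nat) :
    ∀ m, pvCnt f c m = 1 →
      ∃ j, j < m ∧ f j = c ∧ pvLastP f c m = (j : Int) ∧ ∀ i < m, f i = c → i = j := by
  intro m
  induction m with
  | zero => intro h; simp [pvCnt] at h
  | succ m ih =>
    intro h
    rw [pvCnt] at h
    by_cases hm : f m = c
    · refine ⟨m, by omega, hm, by simp [pvLastP, hm], ?_⟩
      intro i hi hic
      rcases Nat.lt_succ_iff_lt_or_eq.mp hi with hi' | rfl
      · exact absurd hic (pvCnt_zero f c m (by simpa [hm] using h) i hi')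
      · rfl
    · obtain ⟨j, hj, hfj, hl, hu⟩ := ih (by simpa [hm] using h)
      refine ⟨j, by omega, hfj, by simp [pvLastP, hm, hl], ?_⟩
      intro i hi hic
      rcases Nat.lt_succ_iff_lt_or_eq.mp hi with hi' | rfl
      · exact hu i hi' hic
      · exact absurd hic hm

lemma pvDownFind_eq_none {β : Type} (g : Nat → Option β) :
    ∀ m, (∀ i < m, g i = none) → pvDownFind g m = none := by
  intro m
  induction m with
  | zero => intro _; rfl
  | succ m ih =>
    intro h
    rw [pvDownFind, h m (by omega)]
    exact ih (fun i hi => h i (by omega))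

lemma pvDownFind_eq_some {β : Type} (g : Nat → Option β) (j : Nat) (v : β) :
    ∀ m, j < m → g j = some v → (∀ i, j < i → i < m → g i = none) →
      pvDownFind g m = some v := by
  intro m
  induction m with
  | zero => intro h; omega
  | succ m ih =>
    intro hj hv hmax
    rw [pvDownFind]
    by_cases hjm : j = m
    · subst hjm; rw [hv]
    · rw [hmax m (by omega) (by omega)]
      exact ih (by omega) hv (fun i h1 h2 => hmax i h1 (by omega))

-- A's reverse loop over range(n-1, -1, -1) is the downward first-hit scan
lemma pvDownScan {β : Type} (g : Int → Option β) :
    ∀ m : Nat, (PySem.List.pyRange ((m : Int) - 1) (-1) (-1)).findSome? g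
      = pvDownFind (fun j => g (j : Int)) m := by
  intro m
  induction m with
  | zero => rw [PySem.List.pyRange_neg_one_eq_nil (by omega)]; rfl
  | succ m ih =>
    rw [PySem.List.pyRange_neg_one_cons (by push_cast; omega), List.findSome?_cons,
      show ((m + 1 : Nat) : Int) - 1 = (m : Int) from by push_cast; ring, ih]
    rfl

-- B's table reduction: invariant of the fold over the code points
lemma pvBFold_succ (freq pos : List Int) (C : Nat) :
    pvBFold freq pos (C + 1)
      = (if freq.getD C 0 = 1 ∧ pos.getD C 0 > (pvBFold freq pos C).1
          then (pos.getD C 0, (C : Int)) else pvBFold freq pos C) := by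
  unfold pvBFold
  rw [List.range_succ, List.foldl_append]
  rfl

lemma pvB_inv (f : Nat → Nat) (m : Nat) (hf : ∀ i, f i < 256) :
    ∀ C, C ≤ 256 →
      (pvBFold (pvFreq f m) (pvPos f m) C = (-1, 0) ∧
        ∀ i < m, f i < C → pvCnt f (f i) m ≠ 1)
      ∨ (∃ j, j < m ∧ f j < C ∧ pvCnt f (f j) m = 1 ∧
          pvBFold (pvFreq f m) (pvPos f m) C = ((j : Int), (f j : Int)) ∧
          ∀ i < m, f i < C → pvCnt f (f i) m = 1 → i ≤ j) := by
  intro C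
  induction C with
  | zero =>
    intro _
    left
    refine ⟨rfl, ?_⟩
    intro i _ h; omega
  | succ C ih =>
    intro hC
    replace ih := ih (by omega)
    rw [pvBFold_succ, pvFreq_getD f hf, pvPos_getD f hf m C (by omega)]
    by_cases hc : pvCnt f C m = 1
    · obtain ⟨j, hj, hfj, hl, hu⟩ := pvCnt_one f C m hc
      rcases ih with ⟨hb, hnone⟩ | ⟨j0, hj0, hfj0, hc0, hb, hmax⟩
      · rw [hb]
        right
        refine ⟨j, hj, by omega, by rwa [hfj], ?_, ?_⟩
        · simp only [hl]
          rw [if_pos ⟨by exact_mod_cast hc, by omega⟩]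
          rw [hfj]
        · intro i hi hiC hci
          rcases Nat.lt_succ_iff_lt_or_eq.mp hiC with h' | h'
          · exact absurd hci (hnone i hi h')
          · exact le_of_eq (hu i hi h')
      · rw [hb, hl]
        by_cases hgt : (j : Int) > (j0 : Int)
        · right
          refine ⟨j, hj, by omega, by rwa [hfj], ?_, ?_⟩
          · rw [if_pos ⟨by exact_mod_cast hc, hgt⟩, hfj]
          · intro i hi hiC hci
            rcases Nat.lt_succ_iff_lt_or_eq.mp hiC with h' | h'
            · have := hmax i hi h' hci; omega
            · exact le_of_eq (hu i hi h')
        · right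
          refine ⟨j0, hj0, by omega, hc0, ?_, ?_⟩
          · rw [if_neg (fun h => hgt h.2)]
          · intro i hi hiC hci
            rcases Nat.lt_succ_iff_lt_or_eq.mp hiC with h' | h'
            · exact hmax i hi h' hci
            · have := hu i hi h'; omega
    · have hne : ((pvCnt f C m : Int)) ≠ 1 := by exact_mod_cast hc
      rw [if_neg (fun h => hne h.1)]
      rcases ih with ⟨hb, hnone⟩ | ⟨j0, hj0, hfj0, hc0, hb, hmax⟩
      · left
        refine ⟨hb, ?_⟩
        intro i hi hiC
        rcases Nat.lt_succ_iff_lt_or_eq.mp hiC with h' | h'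
        · exact hnone i hi h'
        · rw [h']; exact hc
      · right
        refine ⟨j0, hj0, by omega, hc0, hb, ?_⟩
        intro i hi hiC hci
        rcases Nat.lt_succ_iff_lt_or_eq.mp hiC with h' | h'
        · exact hmax i hi h' hci
        · rw [h'] at hci; exact absurd hci hc

-- ===== VERDICT (by name: the statement is the Claim_ definition above) =====
theorem lastNonRepeating_spec : Claim_equal_lastNonRepeating := by
  intro s n hdom hpre
  unfold Spec_lastNonRepeating
  have hchars : ∀ i, pvCode s.toList i < 256 := by
    intro i
    unfold pvCode
    rcases Nat.lt_or_ge i s.toList.length with h | h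
    · have hmem : s.toList.getD i ' ' ∈ s.toList := by
        rw [List.getD_eq_getElem?_getD, List.getElem?_eq_getElem h]
        exact List.getElem_mem h
      have hall : pvDomStr s = true := by
        have := hdom
        unfold Dom_lastNonRepeating at this
        exact (Bool.and_eq_true_iff.mp this).1
      have := List.all_eq_true.mp hall _ hmem
      simp only [pvDomChar, Bool.or_eq_true, Bool.and_eq_true, beq_iff_eq,
        decide_eq_true_eq] at this
      omega
    · rw [List.getD_eq_getElem?_getD, List.getElem?_eq_none (by omega)]
      decide
  rcases (by omega : n ≤ 0 ∨ 0 < n) with hn | hn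
  · -- n ≤ 0: both loops are empty and both return "-1"
    simp only [lastNonRepeating, lastNonRepeating_alt]
    rw [PySem.List.pyRange_one_eq_nil hn, PySem.List.pyRange_neg_one_eq_nil (by omega)]
    simp only [List.foldl_nil, List.findSome?_nil]
    have hfold : (List.range 256).foldl
        (fun (b : Int × Int) c =>
          if ((List.replicate 256 (0:Int), List.replicate 256 (-1:Int)).1.getD c 0 = 1 ∧
              (List.replicate 256 (0:Int), List.replicate 256 (-1:Int)).2.getD c 0 > b.1)
          then ((List.replicate 256 (0:Int), List.replicate 256 (-1:Int)).2.getD c 0, (c : Int))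
          else b) (-1, 0) = (-1, 0) := by
      rw [PySem.List.foldl_congr_mem _ _ (fun b _ => b) _ ?_, PySem.List.foldl_ignore]
      intro b x _
      rw [if_neg]
      rintro ⟨h1, -⟩
      rw [pvGetD_replicate] at h1
      revert h1
      split <;> omega
    rw [hfold]
    norm_num
  · obtain ⟨m, rfl⟩ : ∃ m : Nat, n = (m : Int) := ⟨n.toNat, (Int.toNat_of_nonneg (by omega)).symm⟩
    set f := pvCode s.toList with hfdef
    have hA : lastNonRepeating s (m : Int)
        = match pvDownFind (fun j =>
            if (pvFreq f m).getD (f j) 0 = 1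
            then some (String.ofList [s.toList.getD j ' ']) else none) m with
          | some t => t
          | none => "-1" := by
      simp only [lastNonRepeating]
      have h1 : (PySem.List.pyRange 0 (m : Int) 1).foldl
          (fun freq i =>
            freq.set (PySem.List.pyGetD s.toList i ' ').toNat
              (freq.getD (PySem.List.pyGetD s.toList i ' ').toNat 0 + 1))
          (List.replicate 256 0) = pvFreq f m := by
        simp only [PySem.List.pyRange_zero_natCast, List.foldl_map, PySem.List.pyGetD_natCast]
        rfl
      rw [h1, pvDownScan]
      have hg : (fun j : Nat =>
          if (pvFreq f m).getD (PySem.List.pyGetD s.toList (j : Int) ' ').toNat 0 = 1 then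
            some (String.ofList [PySem.List.pyGetD s.toList (j : Int) ' '])
          else none)
          = (fun j : Nat =>
          if (pvFreq f m).getD (f j) 0 = 1
          then some (String.ofList [s.toList.getD j ' ']) else none) := by
        funext j
        simp only [PySem.List.pyGetD_natCast]
        rfl
      rw [hg]
    have hB : lastNonRepeating_alt s (m : Int)
        = (if (pvBFold (pvFreq f m) (pvPos f m) 256).1 ≥ 0
           then String.ofList [Char.ofNat (pvBFold (pvFreq f m) (pvPos f m) 256).2.toNat]
           else "-1") := by
      simp only [lastNonRepeating_alt]
      have h1 : (PySem.List.pyRange 0 (m : Int) 1).foldl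
          (fun (fp : List Int × List Int) i =>
            (fp.1.set (PySem.List.pyGetD s.toList i ' ').toNat
                (fp.1.getD (PySem.List.pyGetD s.toList i ' ').toNat 0 + 1),
             fp.2.set (PySem.List.pyGetD s.toList i ' ').toNat i))
          (List.replicate 256 0, List.replicate 256 (-1)) = (pvFreq f m, pvPos f m) := by
        simp only [PySem.List.pyRange_zero_natCast, List.foldl_map, PySem.List.pyGetD_natCast]
        rw [PySem.List.foldl_prod_mk
          (f := fun (freq : List Int) (k : Nat) =>
            freq.set (s.toList.getD k ' ').toNat (freq.getD (s.toList.getD k ' ').toNat 0 + 1))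
          (g := fun (pos : List Int) (k : Nat) => pos.set (s.toList.getD k ' ').toNat (k : Int))]
        rfl
      rw [h1]
      rfl
    rw [hA, hB]
    rcases pvB_inv f m hchars 256 le_rfl with ⟨hb, hnone⟩ | ⟨j, hj, _, hc1, hb, hmax⟩
    · rw [hb, pvDownFind_eq_none]
      · norm_num
      · intro i hi
        rw [pvFreq_getD f hchars, if_neg]
        intro h
        exact hnone i hi (hchars i) (by exact_mod_cast h)
    · rw [hb, pvDownFind_eq_some _ j (String.ofList [s.toList.getD j ' ']) m hj ?_ ?_]
      · rw [if_pos (by omega : ((j : Int), ((f j : Nat) : Int)).1 ≥ 0)]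
        simp only [Int.toNat_natCast]
        rw [hfdef]
        unfold pvCode
        rw [Char.ofNat_toNat]
      · rw [pvFreq_getD f hchars, if_pos (by exact_mod_cast hc1)]
      · intro i h1 h2
        rw [pvFreq_getD f hchars, if_neg]
        intro h
        have := hmax i h2 (hchars i) (by exact_mod_cast h)
        omega
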